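-- pv_equiv track=rewrite | github.com/MiroslavaSandoval/invoice_ticket_identifier | 2_Matching_model.py | max_consecutive_chars
-- ===== SOURCE A (Python) =====
-- def LCSubstr(S1, S2):
--     """The LCSubstr function calculates the length of the longest common substring
--     (LCSubstr) between two strings S1 and S2."""
--     # Ensure both are strings for comparison
--     S1 = str(S1).lower() if isinstance(S1, str) else str(S1)
--     S2 = str(S2).lower() if isinstance(S2, str) else str(S2)
--
--     m = len(S1)
--     n = len(S2)
--     result = 0  # Length of the LCSubstr
--     length_table = [[0] * (n + 1) for _ in range(m + 1)]  # Initialize the matrix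
--
--     for i in range(m + 1):
--         for j in range(n + 1):
--             if i == 0 or j == 0:
--                 length_table[i][j] = 0
--             elif S1[i-1] == S2[j-1]:
--                 length_table[i][j] = length_table[i-1][j-1] + 1
--                 result = max(result, length_table[i][j])
--             else:
--                 length_table[i][j] = 0
--     return result
--
-- def max_consecutive_chars(A, B):
--     """
--     Calculates the maximum similarity of consecutive substrings between the elements of lists A and B.
--
--     The function compares each element of A with each element of B to find the greatest length
--     of common substring (using LCSubstr). The sum of the maximum lengths for each element of A
--     defines the return value.
--
--     Parameters:
--     - A (list): First list of strings to compare.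
--     - B (list): Second list of strings to compare.
--
--     Returns:
--     - total_max (int): Sum of the maximum lengths of common substrings for each element of A.
--     """
--     total_max = 0
--     for a in A:
--         a = a.lower() if isinstance(a, str) else a
--         max_length_for_a = 0
--         for b in B:
--             b = b.lower() if isinstance(b, str) else b
--             max_length_for_a = max(max_length_for_a, LCSubstr(a, b))
--         total_max += max_length_for_a
--     return total_max
-- ===== SOURCE B (Python) =====
-- def _lcs_len(s, t):
--     """Longest common substring length by direct extension: for every pair of
--     start positions, extend the match as far as it goes (O(1) extra space,
--     no DP table)."""
--     best = 0
--     for i in range(len(s)):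
--         for j in range(len(t)):
--             k = 0
--             while i + k < len(s) and j + k < len(t) and s[i + k] == t[j + k]:
--                 k += 1
--             if k > best:
--                 best = k
--     return best
--
-- def max_consecutive_chars(A, B):
--     total = 0
--     for a in A:
--         s = a.lower()
--         best = 0
--         for b in B:
--             l = _lcs_len(s, b.lower())
--             if l > best:
--                 best = l
--         total += best
--     return total
-- ===== Notes on version B (the rewrite author's own statement) =====
-- stated objective: alternative
-- what changed: Replaces the (m+1)x(n+1) DP table of LCSubstr by a table-free direct-extension search: for every pair of start positions the common run is extended character by character, so the per-pair computation keeps no state beyond the running best (it trades the DP's guaranteed O(mn) per pair for O(1) space and an O(mn*L) worst case).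
import Mathlib
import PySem

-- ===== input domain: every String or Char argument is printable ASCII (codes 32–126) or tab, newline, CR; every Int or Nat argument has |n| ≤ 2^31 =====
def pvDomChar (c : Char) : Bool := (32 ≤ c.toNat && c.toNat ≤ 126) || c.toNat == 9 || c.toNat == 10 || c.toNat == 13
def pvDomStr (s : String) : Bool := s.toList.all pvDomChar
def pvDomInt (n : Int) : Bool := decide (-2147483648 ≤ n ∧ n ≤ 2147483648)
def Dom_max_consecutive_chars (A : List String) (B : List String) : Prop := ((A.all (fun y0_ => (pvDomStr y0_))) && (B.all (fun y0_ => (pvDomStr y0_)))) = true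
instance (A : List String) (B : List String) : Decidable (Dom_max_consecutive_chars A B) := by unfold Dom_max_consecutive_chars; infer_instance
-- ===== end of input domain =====

-- B replaces LCSubstr's (m+1)x(n+1) DP table by a table-free direct-extension search
-- (extend the common run from every pair of start positions); alternative algorithm, not claimed faster.

-- ===== PORT A =====
-- length_table[i][j] (a read / a write); the Python indices used here are always nonnegative and in range
def pvTget (t : List (List Int)) (i j : Int) : Int :=
  PySem.List.pyGetD (PySem.List.pyGetD t i []) j 0
def pvTset (t : List (List Int)) (i j : Int) (v : Int) : List (List Int) :=
  t.set i.toNat ((t.getD i.toNat []).set j.toNat v)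
-- the body of LCSubstr's doubly-nested loop, acting on the state (result, length_table)
def pvLCCell (s1 s2 : List Char) (i j : Int) (st : Int × List (List Int)) : Int × List (List Int) :=
  if i == 0 || j == 0 then (st.1, pvTset st.2 i j 0)
  else if PySem.List.pyGetD s1 (i - 1) ' ' == PySem.List.pyGetD s2 (j - 1) ' ' then
    let v := pvTget st.2 (i - 1) (j - 1) + 1
    (max st.1 v, pvTset st.2 i j v)
  else (st.1, pvTset st.2 i j 0)
-- LCSubstr's DP on the two (already lowered) char lists
def pvDP (s1 s2 : List Char) : Int :=
  let m : Int := s1.length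
  let n : Int := s2.length
  let t0 : List (List Int) := (List.range (s1.length + 1)).map (fun _ => List.replicate (s2.length + 1) (0 : Int))
  ((PySem.List.pyRange 0 (m + 1) 1).foldl (fun st i =>
      (PySem.List.pyRange 0 (n + 1) 1).foldl (fun st j => pvLCCell s1 s2 i j st) st)
    ((0 : Int), t0)).1
-- LCSubstr(S1, S2): both arguments are strings, so both are lowered (once more) here
def LCSubstrPort (S1 S2 : String) : Int :=
  pvDP (PySem.Chars.lower S1.toList) (PySem.Chars.lower S2.toList)
def max_consecutive_chars (A : List String) (B : List String) : Int :=
  A.foldl (fun total_max a =>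
    let a' := PySem.Str.lower a
    let max_length_for_a := B.foldl (fun mx b => max mx (LCSubstrPort a' (PySem.Str.lower b))) 0
    total_max + max_length_for_a) 0

-- ===== PORT B =====
-- the while loop of Source B: length of the common run starting at the two heads
def pvExt : List Char → List Char → Int
  | x :: xs, y :: ys => if x == y then 1 + pvExt xs ys else 0
  | _, _ => 0
-- _lcs_len(s, t): extend from every pair of start positions, keep the best
def pvLcsLen (s t : List Char) : Int :=
  (List.range s.length).foldl (fun best i =>
    (List.range t.length).foldl (fun best j =>
      let k := pvExt (s.drop i) (t.drop j)
      if k > best then k else best) best) 0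
def max_consecutive_chars_alt (A : List String) (B : List String) : Int :=
  A.foldl (fun total a =>
    let s := PySem.Chars.lower a.toList
    let best := B.foldl (fun best b =>
      let l := pvLcsLen s (PySem.Chars.lower b.toList)
      if l > best then l else best) 0
    total + best) 0

-- ===== PRECONDITION & SPEC =====
def Spec_max_consecutive_chars (A : List String) (B : List String) (out : Int) : Prop := out = max_consecutive_chars_alt A B
instance (A : List String) (B : List String) (out : Int) : Decidable (Spec_max_consecutive_chars A B out) := by unfold Spec_max_consecutive_chars; infer_instance

-- ===== CLAIM (what is proved, stated in full; the proofs are below) =====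
def Claim_equal_max_consecutive_chars : Prop := ∀ (A : List String) (B : List String), Dom_max_consecutive_chars A B → Spec_max_consecutive_chars A B (max_consecutive_chars A B)

-- ===== LEMMAS AND PROOFS =====

-- Python's str.lower is idempotent, so LCSubstr's second .lower() is the identity on A's already-lowered inputs
theorem pv_lowerChar_idem (c : Char) : PySem.Chars.lowerChar (PySem.Chars.lowerChar c) = PySem.Chars.lowerChar c := by
  unfold PySem.Chars.lowerChar PySem.Chars.isupper
  split
  next h =>
    simp only [Bool.and_eq_true, decide_eq_true_eq, Char.le_def, UInt32.le_iff_toNat_le] at h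
    have hA : 'A'.val.toNat = 65 := rfl
    have hZ : 'Z'.val.toNat = 90 := rfl
    have hcv : c.toNat = c.val.toNat := rfl
    have h1 : c.toNat ≤ 90 := by omega
    have hv : (Char.ofNat (c.toNat + 32)).toNat = c.toNat + 32 := by
      rw [Char.toNat_ofNat, if_pos]
      unfold Nat.isValidChar
      omega
    rw [if_neg]
    intro hc
    rw [Bool.and_eq_true, decide_eq_true_eq, decide_eq_true_eq, Char.le_def, Char.le_def,
        UInt32.le_iff_toNat_le, UInt32.le_iff_toNat_le] at hc
    have hdv : (Char.ofNat (c.toNat + 32)).toNat = (Char.ofNat (c.toNat + 32)).val.toNat := rfl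
    omega
  next h => rfl

theorem pv_lower_idem (s : List Char) : PySem.Chars.lower (PySem.Chars.lower s) = PySem.Chars.lower s := by
  simp [PySem.Chars.lower, pv_lowerChar_idem]

theorem pvExt_nonneg (u v : List Char) : 0 ≤ pvExt u v := by
  induction u generalizing v with
  | nil => simp [pvExt]
  | cons x xs ih =>
    cases v with
    | nil => simp [pvExt]
    | cons y ys =>
      simp only [pvExt]
      split
      · have := ih ys; omega
      · omega

theorem pvExt_ge_iff (u v : List Char) (e : Nat) :
    ((e : Int) ≤ pvExt u v) ↔ (e ≤ u.length ∧ e ≤ v.length ∧ ∀ k < e, u[k]? = v[k]?) := by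
  induction u generalizing v e with
  | nil =>
    cases e with
    | zero => simp [pvExt]
    | succ e' => simp [pvExt]
  | cons x xs ih =>
    cases v with
    | nil =>
      cases e with
      | zero => simp [pvExt]
      | succ e' => simp [pvExt]
    | cons y ys =>
      cases e with
      | zero => simp [pvExt_nonneg]
      | succ e' =>
        simp only [pvExt]
        split
        next hxy =>
          have hxy' : x = y := by simpa using hxy
          rw [show ((e' + 1 : Nat) : Int) = (e' : Int) + 1 by push_cast; ring]
          constructor
          · intro h
            have := (ih ys e').mp (by omega)
            refine ⟨by simpa using this.1, by simpa using this.2.1, ?_⟩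
            intro k hk
            cases k with
            | zero => simp [hxy']
            | succ k' => simpa using this.2.2 k' (by omega)
          · intro ⟨h1, h2, h3⟩
            have : (e' : Int) ≤ pvExt xs ys := by
              apply (ih ys e').mpr
              refine ⟨by simpa using h1, by simpa using h2, ?_⟩
              intro k hk
              have := h3 (k+1) (by omega)
              simpa using this
            omega
        next hxy =>
          have hxy' : ¬ x = y := by simpa using hxy
          constructor
          · intro h; exfalso; omega
          · intro ⟨h1, h2, h3⟩
            exact absurd (by simpa using h3 0 (by omega)) hxy'

def pvE (s t : List Char) (i j : Nat) : Int :=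
  pvExt ((s.take i).reverse) ((t.take j).reverse)

theorem pvE_nonneg (s t : List Char) (i j : Nat) : 0 ≤ pvE s t i j := pvExt_nonneg _ _

theorem pvE_zero_left (s t : List Char) (j : Nat) : pvE s t 0 j = 0 := by
  simp [pvE, pvExt]

theorem pvE_zero_right (s t : List Char) (i : Nat) : pvE s t i 0 = 0 := by
  cases h : (s.take i).reverse <;> simp [pvE, pvExt, h]

theorem pvE_succ (s t : List Char) (i j : Nat) (hi : i < s.length) (hj : j < t.length) :
    pvE s t (i + 1) (j + 1) = if s[i] = t[j] then pvE s t i j + 1 else 0 := by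
  unfold pvE
  rw [List.take_add_one, List.take_add_one, List.getElem?_eq_getElem hi, List.getElem?_eq_getElem hj]
  simp only [Option.toList_some, List.reverse_append, List.reverse_cons, List.reverse_nil,
    List.nil_append, List.cons_append]
  simp only [pvExt]
  split
  next h => rw [if_pos (by simpa using h)]; ring
  next h => rw [if_neg (by simpa using h)]

theorem pv_rev_take_get (s : List Char) (i k : Nat) (hi : i ≤ s.length) (hk : k < i) :
    ((s.take i).reverse)[k]? = s[i - 1 - k]? := by
  have hti : (s.take i).length = i := by simp [Nat.min_eq_left hi]
  rw [List.getElem?_reverse (by omega), hti,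
      List.getElem?_take, if_pos (by omega)]

theorem pvE_ge_iff (s t : List Char) (i j e : Nat) (hi : i ≤ s.length) (hj : j ≤ t.length) :
    ((e : Int) ≤ pvE s t i j) ↔ (e ≤ i ∧ e ≤ j ∧ ∀ k < e, s[i - 1 - k]? = t[j - 1 - k]?) := by
  unfold pvE
  rw [pvExt_ge_iff]
  rw [show (s.take i).reverse.length = i by simp [Nat.min_eq_left hi]]
  rw [show (t.take j).reverse.length = j by simp [Nat.min_eq_left hj]]
  constructor
  · rintro ⟨h1, h2, h3⟩
    refine ⟨h1, h2, ?_⟩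
    intro k hk
    have := h3 k hk
    rwa [pv_rev_take_get s i k hi (by omega), pv_rev_take_get t j k hj (by omega)] at this
  · rintro ⟨h1, h2, h3⟩
    refine ⟨h1, h2, ?_⟩
    intro k hk
    rw [pv_rev_take_get s i k hi (by omega), pv_rev_take_get t j k hj (by omega)]
    exact h3 k hk

theorem pvExt_drop_ge_iff (s t : List Char) (i j e : Nat) :
    ((e : Int) ≤ pvExt (s.drop i) (t.drop j)) ↔
      (e ≤ s.length - i ∧ e ≤ t.length - j ∧ ∀ k < e, s[i + k]? = t[j + k]?) := by
  rw [pvExt_ge_iff]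
  simp only [List.length_drop, List.getElem?_drop]

theorem pv_foldl_max_attained {α : Type} (L : List α) (f : α → Int) (c : Int) :
    L.foldl (fun b x => max b (f x)) c = c ∨ ∃ x ∈ L, L.foldl (fun b x => max b (f x)) c = f x := by
  induction L generalizing c with
  | nil => left; rfl
  | cons x xs ih =>
    simp only [List.foldl_cons]
    rcases ih (max c (f x)) with h | ⟨y, hy, h⟩
    · rcases (le_or_gt (f x) c) with hc | hc
      · left; rw [h, max_eq_left hc]
      · right; exact ⟨x, by simp, by rw [h, max_eq_right (le_of_lt hc)]⟩
    · right; exact ⟨y, by simp [hy], h⟩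

theorem pv_max_if (mx l : Int) : max mx l = if l > mx then l else mx := by
  split
  next h => exact max_eq_right (le_of_lt h)
  next h => exact max_eq_left (by omega)

theorem pvLcsLen_eq_maxfold (s t : List Char) :
    pvLcsLen s t = (List.range s.length).foldl (fun best i =>
      (List.range t.length).foldl (fun best j => max best (pvExt (s.drop i) (t.drop j))) best) 0 := by
  unfold pvLcsLen
  simp only [← pv_max_if]

theorem pv_nested_maxfold_char {α β : Type} (L1 : List α) (L2 : List β) (g : α → β → Int) (c : Int) :
    c ≤ L1.foldl (fun b x => L2.foldl (fun b y => max b (g x y)) b) c ∧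
    (∀ x ∈ L1, ∀ y ∈ L2, g x y ≤ L1.foldl (fun b x => L2.foldl (fun b y => max b (g x y)) b) c) ∧
    (L1.foldl (fun b x => L2.foldl (fun b y => max b (g x y)) b) c = c ∨
      ∃ x ∈ L1, ∃ y ∈ L2, L1.foldl (fun b x => L2.foldl (fun b y => max b (g x y)) b) c = g x y) := by
  induction L1 generalizing c with
  | nil => exact ⟨le_refl c, by simp, Or.inl rfl⟩
  | cons x xs ih =>
    simp only [List.foldl_cons]
    obtain ⟨ih1, ih2, ih3⟩ := ih (L2.foldl (fun b y => max b (g x y)) c)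
    have hc : c ≤ L2.foldl (fun b y => max b (g x y)) c := (PySem.List.le_foldl_max_int L2 (g x) c).1
    refine ⟨le_trans hc ih1, ?_, ?_⟩
    · intro x' hx' y hy
      rcases List.mem_cons.mp hx' with rfl | hx'
      · exact le_trans ((PySem.List.le_foldl_max_int L2 (g x') c).2 y hy) ih1
      · exact ih2 x' hx' y hy
    · rcases ih3 with h | ⟨x', hx', y, hy, h⟩
      · rcases pv_foldl_max_attained L2 (g x) c with h2 | ⟨y, hy, h2⟩
        · exact Or.inl (by rw [h, h2])
        · exact Or.inr ⟨x, by simp, y, hy, by rw [h, h2]⟩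
      · exact Or.inr ⟨x', by simp [hx'], y, hy, h⟩

theorem pvLcsLen_char (s t : List Char) :
    0 ≤ pvLcsLen s t ∧
    (∀ i < s.length, ∀ j < t.length, pvExt (s.drop i) (t.drop j) ≤ pvLcsLen s t) ∧
    (pvLcsLen s t = 0 ∨ ∃ i < s.length, ∃ j < t.length, pvLcsLen s t = pvExt (s.drop i) (t.drop j)) := by
  rw [pvLcsLen_eq_maxfold]
  obtain ⟨h1, h2, h3⟩ := pv_nested_maxfold_char (List.range s.length) (List.range t.length)
      (fun i j => pvExt (s.drop i) (t.drop j)) 0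
  refine ⟨h1, ?_, ?_⟩
  · intro i hi j hj
    exact h2 i (List.mem_range.mpr hi) j (List.mem_range.mpr hj)
  · rcases h3 with h | ⟨i, hi, j, hj, h⟩
    · exact Or.inl h
    · exact Or.inr ⟨i, List.mem_range.mp hi, j, List.mem_range.mp hj, h⟩

def pvDPv (s t : List Char) : Int :=
  (List.range (s.length + 1)).foldl (fun b i =>
    (List.range (t.length + 1)).foldl (fun b j => max b (pvE s t i j)) b) 0

theorem pvDPv_char (s t : List Char) :
    0 ≤ pvDPv s t ∧
    (∀ i ≤ s.length, ∀ j ≤ t.length, pvE s t i j ≤ pvDPv s t) ∧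
    (pvDPv s t = 0 ∨ ∃ i ≤ s.length, ∃ j ≤ t.length, pvDPv s t = pvE s t i j) := by
  obtain ⟨h1, h2, h3⟩ := pv_nested_maxfold_char (List.range (s.length + 1)) (List.range (t.length + 1))
      (fun i j => pvE s t i j) 0
  refine ⟨h1, ?_, ?_⟩
  · intro i hi j hj
    exact h2 i (List.mem_range.mpr (by omega)) j (List.mem_range.mpr (by omega))
  · rcases h3 with h | ⟨i, hi, j, hj, h⟩
    · exact Or.inl h
    · exact Or.inr ⟨i, by have := List.mem_range.mp hi; omega, j, by have := List.mem_range.mp hj; omega, h⟩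

theorem pv_E_le_bf (s t : List Char) (i j : Nat) (hi : i ≤ s.length) (hj : j ≤ t.length) :
    pvE s t i j ≤ pvLcsLen s t := by
  set e : Nat := (pvE s t i j).toNat with he
  have hnn := pvE_nonneg s t i j
  by_cases he0 : e = 0
  · have : pvE s t i j = 0 := by omega
    rw [this]; exact (pvLcsLen_char s t).1
  · have hle : (e : Int) ≤ pvE s t i j := by omega
    obtain ⟨h1, h2, h3⟩ := (pvE_ge_iff s t i j e hi hj).mp hle
    have hext : (e : Int) ≤ pvExt (s.drop (i - e)) (t.drop (j - e)) := by
      rw [pvExt_drop_ge_iff]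
      refine ⟨by omega, by omega, ?_⟩
      intro k hk
      have := h3 (e - 1 - k) (by omega)
      rw [show i - 1 - (e - 1 - k) = i - e + k by omega, show j - 1 - (e - 1 - k) = j - e + k by omega] at this
      exact this
    have hbound := (pvLcsLen_char s t).2.1 (i - e) (by omega) (j - e) (by omega)
    omega

theorem pv_ext_le_dpv (s t : List Char) (i j : Nat) (hi : i < s.length) (hj : j < t.length) :
    pvExt (s.drop i) (t.drop j) ≤ pvDPv s t := by
  set e : Nat := (pvExt (s.drop i) (t.drop j)).toNat with he
  have hnn := pvExt_nonneg (s.drop i) (t.drop j)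
  by_cases he0 : e = 0
  · have : pvExt (s.drop i) (t.drop j) = 0 := by omega
    rw [this]; exact (pvDPv_char s t).1
  · have hle : (e : Int) ≤ pvExt (s.drop i) (t.drop j) := by omega
    obtain ⟨h1, h2, h3⟩ := (pvExt_drop_ge_iff s t i j e).mp hle
    have hE : (e : Int) ≤ pvE s t (i + e) (j + e) := by
      rw [pvE_ge_iff s t (i + e) (j + e) e (by omega) (by omega)]
      refine ⟨by omega, by omega, ?_⟩
      intro k hk
      have := h3 (e - 1 - k) (by omega)
      rw [show i + (e - 1 - k) = i + e - 1 - k by omega, show j + (e - 1 - k) = j + e - 1 - k by omega] at this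
      exact this
    have hbound := (pvDPv_char s t).2.1 (i + e) (by omega) (j + e) (by omega)
    omega

theorem pvDPv_eq_bf (s t : List Char) : pvDPv s t = pvLcsLen s t := by
  obtain ⟨d1, d2, d3⟩ := pvDPv_char s t
  obtain ⟨b1, b2, b3⟩ := pvLcsLen_char s t
  apply le_antisymm
  · rcases d3 with h | ⟨i, hi, j, hj, h⟩
    · omega
    · rw [h]; exact pv_E_le_bf s t i j hi hj
  · rcases b3 with h | ⟨i, hi, j, hj, h⟩
    · omega
    · rw [h]; exact pv_ext_le_dpv s t i j hi hj

def pvShape (m n : Nat) (tb : List (List Int)) : Prop :=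
  tb.length = m + 1 ∧ ∀ row ∈ tb, row.length = n + 1

theorem pv_tget_nat (tb : List (List Int)) (i j : Nat) :
    pvTget tb (i : Int) (j : Int) = (tb.getD i []).getD j 0 := by
  simp [pvTget, PySem.List.pyGetD_natCast]

theorem pv_tset_nat (tb : List (List Int)) (i j : Nat) (v : Int) :
    pvTset tb (i : Int) (j : Int) v = tb.set i ((tb.getD i []).set j v) := by
  simp [pvTset]

theorem pv_getD_row_mem (tb : List (List Int)) (i : Nat) (hil : i < tb.length) :
    tb.getD i [] ∈ tb := by
  rw [List.getD_eq_getElem?_getD, List.getElem?_eq_getElem hil]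
  exact List.getElem_mem hil

theorem pv_getD_set_self (tb : List (List Int)) (i : Nat) (row : List Int) (hil : i < tb.length) :
    (tb.set i row).getD i [] = row := by
  rw [List.getD_eq_getElem?_getD, List.getElem?_set, if_pos rfl, if_pos hil]
  rfl

theorem pv_getD_set_ne (tb : List (List Int)) (i i' : Nat) (row : List Int) (hne : i' ≠ i) :
    (tb.set i row).getD i' [] = tb.getD i' [] := by
  rw [List.getD_eq_getElem?_getD, List.getElem?_set, if_neg (fun h => hne h.symm),
      ← List.getD_eq_getElem?_getD]

theorem pv_getD_setcol_ne (row : List Int) (j j' : Nat) (hne : j' ≠ j) (v : Int) :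
    (row.set j v).getD j' 0 = row.getD j' 0 := by
  rw [List.getD_eq_getElem?_getD, List.getElem?_set, if_neg (fun h => hne h.symm),
      ← List.getD_eq_getElem?_getD]

theorem pv_tset_shape {m n : Nat} {tb : List (List Int)} (h : pvShape m n tb)
    (i j : Nat) (hi : i ≤ m) (v : Int) :
    pvShape m n (pvTset tb (i : Int) (j : Int) v) := by
  rw [pv_tset_nat]
  obtain ⟨h1, h2⟩ := h
  refine ⟨by simp [h1], ?_⟩
  intro row hrow
  rcases List.mem_or_eq_of_mem_set hrow with h | rfl
  · exact h2 row h
  · rw [List.length_set]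
    exact h2 _ (pv_getD_row_mem tb i (by omega))

theorem pv_tget_tset_same {m n : Nat} {tb : List (List Int)} (h : pvShape m n tb)
    (i j : Nat) (hi : i ≤ m) (hj : j ≤ n) (v : Int) :
    pvTget (pvTset tb (i : Int) (j : Int) v) (i : Int) (j : Int) = v := by
  rw [pv_tset_nat, pv_tget_nat]
  obtain ⟨h1, h2⟩ := h
  have hil : i < tb.length := by omega
  have hrowlen : (tb.getD i []).length = n + 1 := h2 _ (pv_getD_row_mem tb i hil)
  rw [pv_getD_set_self tb i _ hil]
  rw [List.getD_eq_getElem?_getD, List.getElem?_set, if_pos rfl, if_pos (by omega)]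
  rfl

theorem pv_tget_tset_other {tb : List (List Int)}
    (i j i' j' : Nat) (hne : i' ≠ i ∨ j' ≠ j) (v : Int) :
    pvTget (pvTset tb (i : Int) (j : Int) v) (i' : Int) (j' : Int) = pvTget tb (i' : Int) (j' : Int) := by
  rw [pv_tset_nat, pv_tget_nat, pv_tget_nat]
  by_cases hii : i' = i
  · subst hii
    have hne' : j' ≠ j := by tauto
    by_cases hil : i' < tb.length
    · rw [pv_getD_set_self tb i' _ hil, pv_getD_setcol_ne _ j j' hne' v]
    · rw [List.set_eq_of_length_le (by omega)]
  · rw [pv_getD_set_ne tb i i' _ hii]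

theorem pv_cell_eq (s t : List Char) (i j : Nat) (hi : i ≤ s.length) (hj : j ≤ t.length)
    (r : Int) (hr : 0 ≤ r) (tb : List (List Int))
    (hprev : 1 ≤ i → 1 ≤ j → pvTget tb ((i - 1 : Nat) : Int) ((j - 1 : Nat) : Int) = pvE s t (i - 1) (j - 1)) :
    pvLCCell s t (i : Int) (j : Int) (r, tb)
      = (max r (pvE s t i j), pvTset tb (i : Int) (j : Int) (pvE s t i j)) := by
  unfold pvLCCell
  by_cases hi0 : i = 0
  · subst hi0
    rw [if_pos (by simp)]
    rw [pvE_zero_left, max_eq_left hr]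
  · by_cases hj0 : j = 0
    · subst hj0
      rw [if_pos (by simp)]
      rw [pvE_zero_right, max_eq_left hr]
    · rw [if_neg (by simp; omega)]
      have hc1 : ((i : Int) - 1) = ((i - 1 : Nat) : Int) := by omega
      have hc2 : ((j : Int) - 1) = ((j - 1 : Nat) : Int) := by omega
      have hg1 : PySem.List.pyGetD s ((i : Int) - 1) ' ' = s[i - 1]'(by omega) := by
        rw [hc1, PySem.List.pyGetD_natCast, List.getD_eq_getElem?_getD,
            List.getElem?_eq_getElem (by omega)]
        rfl
      have hg2 : PySem.List.pyGetD t ((j : Int) - 1) ' ' = t[j - 1]'(by omega) := by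
        rw [hc2, PySem.List.pyGetD_natCast, List.getD_eq_getElem?_getD,
            List.getElem?_eq_getElem (by omega)]
        rfl
      have hE : pvE s t i j = if s[i - 1]'(by omega) = t[j - 1]'(by omega) then pvE s t (i - 1) (j - 1) + 1 else 0 := by
        have := pvE_succ s t (i - 1) (j - 1) (by omega) (by omega)
        rw [show i - 1 + 1 = i by omega, show j - 1 + 1 = j by omega] at this
        exact this
      rw [hg1, hg2]
      split
      next hcc =>
        have hcc' : s[i - 1]'(by omega) = t[j - 1]'(by omega) := by simpa using hcc
        rw [hE, if_pos hcc']
        rw [hc1, hc2, hprev (by omega) (by omega)]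
      next hcc =>
        have hcc' : ¬ s[i - 1]'(by omega) = t[j - 1]'(by omega) := by simpa using hcc
        rw [hE, if_neg hcc', max_eq_left hr]

theorem pv_inner (s t : List Char) (i : Nat) (hi : i ≤ s.length) :
    ∀ J, J ≤ t.length + 1 → ∀ (r : Int) (tb : List (List Int)), 0 ≤ r →
    pvShape s.length t.length tb →
    (1 ≤ i → ∀ j ≤ t.length, pvTget tb ((i - 1 : Nat) : Int) (j : Int) = pvE s t (i - 1) j) →
    pvShape s.length t.length ((List.range J).foldl (fun st (j : Nat) => pvLCCell s t (i : Int) (j : Int) st) (r, tb)).2 ∧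
    (1 ≤ i → ∀ j ≤ t.length, pvTget ((List.range J).foldl (fun st (j : Nat) => pvLCCell s t (i : Int) (j : Int) st) (r, tb)).2 ((i - 1 : Nat) : Int) (j : Int) = pvE s t (i - 1) j) ∧
    (∀ j < J, pvTget ((List.range J).foldl (fun st (j : Nat) => pvLCCell s t (i : Int) (j : Int) st) (r, tb)).2 (i : Int) (j : Int) = pvE s t i j) ∧
    ((List.range J).foldl (fun st (j : Nat) => pvLCCell s t (i : Int) (j : Int) st) (r, tb)).1
      = (List.range J).foldl (fun b (j : Nat) => max b (pvE s t i j)) r := by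
  intro J
  induction J with
  | zero =>
    intro _ r tb hr hsh hprev
    exact ⟨hsh, hprev, by omega, rfl⟩
  | succ J ih =>
    intro hJ r tb hr hsh hprev
    obtain ⟨ih1, ih2, ih3, ih4⟩ := ih (by omega) r tb hr hsh hprev
    set stJ := (List.range J).foldl (fun st (j : Nat) => pvLCCell s t (i : Int) (j : Int) st) (r, tb) with hstJ
    have hrJ : 0 ≤ stJ.1 := by
      rw [ih4]
      have := (PySem.List.le_foldl_max_int (List.range J) (fun j => pvE s t i j) r).1
      omega
    have hcell := pv_cell_eq s t i J hi (by omega) stJ.1 hrJ stJ.2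
      (fun h1 h2 => ih2 h1 (J - 1) (by omega))
    simp only [List.range_succ, List.foldl_append, List.foldl_cons, List.foldl_nil]
    rw [← hstJ, show stJ = (stJ.1, stJ.2) from rfl, hcell]
    refine ⟨pv_tset_shape ih1 i J hi _, ?_, ?_, by rw [ih4]⟩
    · intro h1 j hj
      rw [pv_tget_tset_other i J (i - 1) j (Or.inl (by omega)) _]
      exact ih2 h1 j hj
    · intro j hj
      by_cases hje : j = J
      · subst hje
        exact pv_tget_tset_same ih1 i j hi (by omega) _
      · rw [pv_tget_tset_other i J i j (Or.inr hje) _]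
        exact ih3 j (by omega)

def pvT0 (s t : List Char) : List (List Int) :=
  (List.range (s.length + 1)).map (fun _ => List.replicate (t.length + 1) (0 : Int))

theorem pvT0_shape (s t : List Char) : pvShape s.length t.length (pvT0 s t) := by
  constructor
  · simp [pvT0]
  · intro row hrow
    simp only [pvT0, List.mem_map] at hrow
    obtain ⟨_, _, rfl⟩ := hrow
    simp

theorem pv_outer (s t : List Char) :
    ∀ I, I ≤ s.length + 1 →
    pvShape s.length t.length ((List.range I).foldl (fun st (i : Nat) =>
        (List.range (t.length + 1)).foldl (fun st (j : Nat) => pvLCCell s t (i : Int) (j : Int) st) st)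
        ((0 : Int), pvT0 s t)).2 ∧
    (1 ≤ I → ∀ j ≤ t.length, pvTget ((List.range I).foldl (fun st (i : Nat) =>
        (List.range (t.length + 1)).foldl (fun st (j : Nat) => pvLCCell s t (i : Int) (j : Int) st) st)
        ((0 : Int), pvT0 s t)).2 ((I - 1 : Nat) : Int) (j : Int) = pvE s t (I - 1) j) ∧
    ((List.range I).foldl (fun st (i : Nat) =>
        (List.range (t.length + 1)).foldl (fun st (j : Nat) => pvLCCell s t (i : Int) (j : Int) st) st)
        ((0 : Int), pvT0 s t)).1
      = (List.range I).foldl (fun b (i : Nat) =>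
          (List.range (t.length + 1)).foldl (fun b (j : Nat) => max b (pvE s t i j)) b) 0 := by
  intro I
  induction I with
  | zero =>
    intro _
    exact ⟨pvT0_shape s t, by omega, rfl⟩
  | succ I ih =>
    intro hI
    obtain ⟨ih1, ih2, ih3⟩ := ih (by omega)
    set stI := (List.range I).foldl (fun st (i : Nat) =>
        (List.range (t.length + 1)).foldl (fun st (j : Nat) => pvLCCell s t (i : Int) (j : Int) st) st)
        ((0 : Int), pvT0 s t) with hstI
    have hrI : 0 ≤ stI.1 := by
      rw [ih3]
      obtain ⟨h1, _, _⟩ := pv_nested_maxfold_char (List.range I) (List.range (t.length + 1))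
        (fun i j => pvE s t i j) 0
      exact h1
    obtain ⟨in1, in2, in3, in4⟩ := pv_inner s t I (by omega) (t.length + 1) (by omega)
      stI.1 stI.2 hrI ih1 ih2
    have hsplit : ∀ {β : Type} (g : β → Nat → β) (init : β),
        (List.range (I + 1)).foldl g init = g ((List.range I).foldl g init) I := by
      intro β g init
      rw [List.range_succ, List.foldl_append, List.foldl_cons, List.foldl_nil]
    rw [hsplit, hsplit, ← hstI, show stI = (stI.1, stI.2) from rfl]
    refine ⟨in1, ?_, ?_⟩
    · intro _ j hj
      have := in3 j (by omega)
      simpa using this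
    · rw [in4, ih3]

theorem pvDP_eq_dpv (s t : List Char) : pvDP s t = pvDPv s t := by
  unfold pvDP
  simp only [PySem.List.pyRange_one]
  rw [show (((s.length : Int) + 1 - 0)).toNat = s.length + 1 by omega,
      show (((t.length : Int) + 1 - 0)).toNat = t.length + 1 by omega]
  simp only [List.foldl_map, zero_add]
  have h := (pv_outer s t (s.length + 1) (le_refl _)).2.2
  rw [show ((List.range (s.length + 1)).map (fun _ => List.replicate (t.length + 1) (0 : Int))) = pvT0 s t from rfl]
  rw [h]
  rfl

theorem main_dp_eq_bf (s t : List Char) : pvDP s t = pvLcsLen s t :=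
  (pvDP_eq_dpv s t).trans (pvDPv_eq_bf s t)

theorem pv_pair_eq (a b : String) :
    LCSubstrPort (PySem.Str.lower a) (PySem.Str.lower b)
      = pvLcsLen (PySem.Chars.lower a.toList) (PySem.Chars.lower b.toList) := by
  unfold LCSubstrPort
  rw [show (PySem.Str.lower a).toList = PySem.Chars.lower a.toList from by simp [PySem.Str.lower],
      show (PySem.Str.lower b).toList = PySem.Chars.lower b.toList from by simp [PySem.Str.lower],
      pv_lower_idem, pv_lower_idem, main_dp_eq_bf]

-- ===== VERDICT (by name: the statement is the Claim_ definition above) =====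
theorem max_consecutive_chars_spec : Claim_equal_max_consecutive_chars := by
  intro A B _
  unfold Spec_max_consecutive_chars
  unfold max_consecutive_chars max_consecutive_chars_alt
  simp only [pv_max_if, pv_pair_eq]
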